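-- pv_equiv track=rewrite | github.com/terse2103/Weekly-Product-Pulse-And-Fee-Explainer | phase5_note_generation/note_generator.py | summarize_reviews
-- ===== SOURCE A (Python) =====
-- def summarize_reviews(themed_reviews, themes):
--     """
--     Creates a structured summary of themed reviews to pass to the LLM.
--
--     Returns a string containing:
--     - Total review count
--     - Top themes ranked by review count
--     - Sample user quotes (up to 5) per top theme
--     """
--     # Count reviews per theme and collect sample quotes
--     theme_counts = {theme["theme"]: 0 for theme in themes}
--     theme_reviews = {theme["theme"]: [] for theme in themes}
--     theme_desc = {theme["theme"]: theme.get("description", "") for theme in themes}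
--
--     # Also handle 'Other' if present in themed_reviews
--     for item in themed_reviews:
--         theme = item.get("theme", "Other")
--         if theme not in theme_counts:
--             theme_counts[theme] = 0
--             theme_reviews[theme] = []
--             theme_desc[theme] = ""
--         theme_counts[theme] += 1
--
--         if "text" in item:
--             theme_reviews[theme].append(item["text"])
--
--     # Sort themes by count (descending)
--     sorted_themes = sorted(theme_counts.items(), key=lambda x: x[1], reverse=True)
--     top_themes = sorted_themes[:3]
--
--     summary = []
--     summary.append(f"Total reviews: {len(themed_reviews)}")
--     summary.append("\nTop Themes:")
--     for theme_name, count in top_themes: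
--         desc = theme_desc.get(theme_name, "")
--         summary.append(f"- {theme_name}: {count} reviews. Description: {desc}")
--         # Provide sample quotes for the LLM to choose from (up to 5 per theme)
--         quotes = theme_reviews.get(theme_name, [])[:5]
--         for q in quotes:
--             summary.append(f'  * "{q}"')
--
--     return "\n".join(summary)
-- ===== SOURCE B (Python) =====
-- def summarize_reviews(themed_reviews, themes):
--     """Two-pass rewrite: count first, pick the top 3, then collect quotes only
--     for those themes by re-scanning the reviews (no per-theme quote lists are
--     kept for themes that never make the cut)."""
--     counts = {}
--     desc = {}
--     for t in themes:
--         counts[t["theme"]] = 0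
--         desc[t["theme"]] = t.get("description", "")
--
--     for item in themed_reviews:
--         th = item.get("theme", "Other")
--         if th not in counts:
--             counts[th] = 0
--             desc[th] = ""
--         counts[th] += 1
--
--     top = sorted(counts.items(), key=lambda x: x[1], reverse=True)[:3]
--
--     lines = [f"Total reviews: {len(themed_reviews)}", "\nTop Themes:"]
--     for name, c in top:
--         lines.append(f"- {name}: {c} reviews. Description: {desc.get(name, '')}")
--         quotes = [i["text"] for i in themed_reviews
--                   if i.get("theme", "Other") == name and "text" in i][:5]
--         for q in quotes:
--             lines.append(f'  * "{q}"')
--     return "\n".join(lines)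
-- ===== Notes on version B (the rewrite author's own statement) =====
-- stated objective: alternative
-- what changed: A builds per-theme quote lists for every theme while counting in one combined pass; B only counts (and records descriptions) in the first pass, picks the top 3, and then recomputes the at-most-5 quotes for just those 3 themes by re-scanning the reviews with a comprehension.
import Mathlib
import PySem

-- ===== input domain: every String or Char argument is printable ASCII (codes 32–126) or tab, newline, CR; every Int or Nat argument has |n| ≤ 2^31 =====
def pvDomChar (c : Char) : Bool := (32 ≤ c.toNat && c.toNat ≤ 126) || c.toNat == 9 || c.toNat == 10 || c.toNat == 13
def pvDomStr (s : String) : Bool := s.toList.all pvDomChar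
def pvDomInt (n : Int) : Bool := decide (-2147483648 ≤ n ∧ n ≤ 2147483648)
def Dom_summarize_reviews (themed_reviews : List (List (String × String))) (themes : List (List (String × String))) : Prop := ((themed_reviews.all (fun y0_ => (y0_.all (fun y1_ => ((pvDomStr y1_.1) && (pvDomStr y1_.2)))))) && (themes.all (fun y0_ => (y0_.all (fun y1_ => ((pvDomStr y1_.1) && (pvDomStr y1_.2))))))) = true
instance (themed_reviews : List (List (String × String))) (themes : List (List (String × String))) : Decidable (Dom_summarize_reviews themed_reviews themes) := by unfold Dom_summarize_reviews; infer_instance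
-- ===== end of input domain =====

-- B re-decomposes A: one counting pass (no per-theme quote lists), top-3 selection, then quotes recomputed by re-scanning the reviews per top theme; return value only, no mutation.

-- shared low-level helpers: each input "dict" is an association list, viewed through PySem.Dict
def pvD (item : List (String × String)) : PySem.Dict String String := PySem.Dict.mk item
-- t["theme"]: under Pre_ the key is present, so the .getD "" never supplies the default
def pvThemeKey (t : List (String × String)) : String := ((pvD t).get? "theme").getD ""
-- item.get("theme", "Other")
def pvItemTheme (i : List (String × String)) : String := (pvD i).getD "theme" "Other"
-- f-string assembly through PySem.Str.join (kernel-reducible concatenation)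
def pvFmt (parts : List String) : String := PySem.Str.join "" parts

-- ===== PORT A =====
def pvAStep (st : PySem.Dict String Int × PySem.Dict String (List String) × PySem.Dict String String)
    (item : List (String × String)) :
    PySem.Dict String Int × PySem.Dict String (List String) × PySem.Dict String String :=
  let theme := pvItemTheme item
  let st := if (st.1.contains theme) = false then
      (st.1.insert theme 0, st.2.1.insert theme [], st.2.2.insert theme "") else st
  let tc := st.1.insert theme (st.1.getD theme 0 + 1)
  let trv := if (pvD item).contains "text" then
      st.2.1.modify theme [] (· ++ [(pvD item).getD "text" ""]) else st.2.1
  (tc, trv, st.2.2)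

def summarize_reviews (themed_reviews : List (List (String × String))) (themes : List (List (String × String))) : String :=
  let theme_counts : PySem.Dict String Int := themes.foldl (fun d t => d.insert (pvThemeKey t) 0) PySem.Dict.empty
  let theme_reviews : PySem.Dict String (List String) := themes.foldl (fun d t => d.insert (pvThemeKey t) []) PySem.Dict.empty
  let theme_desc : PySem.Dict String String := themes.foldl (fun d t => d.insert (pvThemeKey t) ((pvD t).getD "description" "")) PySem.Dict.empty
  let st := themed_reviews.foldl pvAStep (theme_counts, theme_reviews, theme_desc)
  let sorted_themes := PySem.List.sorted st.1.items (fun x => x.2) true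
  let top_themes := PySem.List.slice sorted_themes none (some 3)
  let summary : List String := [pvFmt ["Total reviews: ", PySem.Int.toStr themed_reviews.length], "\nTop Themes:"]
  let summary := top_themes.foldl (fun acc p =>
      let desc := st.2.2.getD p.1 ""
      let acc := acc ++ [pvFmt ["- ", p.1, ": ", PySem.Int.toStr p.2, " reviews. Description: ", desc]]
      let quotes := PySem.List.slice (st.2.1.getD p.1 []) none (some 5)
      quotes.foldl (fun a q => a ++ [pvFmt ["  * \"", q, "\""]]) acc) summary
  PySem.Str.join "\n" summary

-- ===== PORT B =====
def pvBStep (st : PySem.Dict String Int × PySem.Dict String String) (item : List (String × String)) :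
    PySem.Dict String Int × PySem.Dict String String :=
  let th := pvItemTheme item
  let st := if (st.1.contains th) = false then (st.1.insert th 0, st.2.insert th "") else st
  (st.1.insert th (st.1.getD th 0 + 1), st.2)

-- the per-theme comprehension of B: texts of reviews tagged with this theme, capped at 5
def pvQuotes (themed_reviews : List (List (String × String))) (name : String) : List String :=
  (themed_reviews.filterMap (fun i => if pvItemTheme i == name then (pvD i).get? "text" else none)).take 5

def summarize_reviews_alt (themed_reviews : List (List (String × String))) (themes : List (List (String × String))) : String :=
  let cd : PySem.Dict String Int × PySem.Dict String String :=
    themes.foldl (fun cd t => (cd.1.insert (pvThemeKey t) 0, cd.2.insert (pvThemeKey t) ((pvD t).getD "description" ""))) (PySem.Dict.empty, PySem.Dict.empty)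
  let cd := themed_reviews.foldl pvBStep cd
  let top := (PySem.List.sorted cd.1.items (fun x => x.2) true).take 3
  let lines : List String := [pvFmt ["Total reviews: ", PySem.Int.toStr themed_reviews.length], "\nTop Themes:"]
  let lines := top.foldl (fun acc p =>
      let acc := acc ++ [pvFmt ["- ", p.1, ": ", PySem.Int.toStr p.2, " reviews. Description: ", cd.2.getD p.1 ""]]
      (pvQuotes themed_reviews p.1).foldl (fun a q => a ++ [pvFmt ["  * \"", q, "\""]]) acc) lines
  PySem.Str.join "\n" lines

-- ===== PRECONDITION & SPEC =====
-- Pre_ excludes exactly the inputs where A raises KeyError: a theme dict without a "theme" key.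
def Pre_summarize_reviews (_themed_reviews : List (List (String × String))) (themes : List (List (String × String))) : Prop :=
  ∀ t ∈ themes, ((pvD t).get? "theme").isSome = true
instance (themed_reviews : List (List (String × String))) (themes : List (List (String × String))) : Decidable (Pre_summarize_reviews themed_reviews themes) := by unfold Pre_summarize_reviews; infer_instance

def pvWitness_summarize_reviews : (List (List (String × String))) × (List (List (String × String))) :=
  ([[("theme", "A"), ("text", "hi")]], [[("theme", "A"), ("description", "d")]])

def Spec_summarize_reviews (themed_reviews : List (List (String × String))) (themes : List (List (String × String))) (out : String) : Prop := out = summarize_reviews_alt themed_reviews themes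
instance (themed_reviews : List (List (String × String))) (themes : List (List (String × String))) (out : String) : Decidable (Spec_summarize_reviews themed_reviews themes out) := by unfold Spec_summarize_reviews; infer_instance

-- ===== CLAIM (what is proved, stated in full; the proofs are below) =====
def Claim_equal_summarize_reviews : Prop := ∀ (themed_reviews : List (List (String × String))) (themes : List (List (String × String))), Dom_summarize_reviews themed_reviews themes → Pre_summarize_reviews themed_reviews themes → Spec_summarize_reviews themed_reviews themes (summarize_reviews themed_reviews themes)

-- ===== LEMMAS AND PROOFS =====

-- B's seeding pair-fold is A's two separate seed folds
lemma seed_pair (themes : List (List (String × String))) (c : PySem.Dict String Int) (d : PySem.Dict String String) :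
    themes.foldl (fun cd t => (cd.1.insert (pvThemeKey t) 0, cd.2.insert (pvThemeKey t) ((pvD t).getD "description" ""))) (c, d)
    = (themes.foldl (fun c t => c.insert (pvThemeKey t) 0) c,
       themes.foldl (fun d t => d.insert (pvThemeKey t) ((pvD t).getD "description" "")) d) := by
  induction themes generalizing c d with
  | nil => rfl
  | cons t ts ih => simp only [List.foldl]; exact ih _ _

-- A's main fold projected to (counts, desc) is B's main fold
lemma main_proj (l : List (List (String × String))) (tc : PySem.Dict String Int)
    (trv : PySem.Dict String (List String)) (td : PySem.Dict String String) :
    ((l.foldl pvAStep (tc, trv, td)).1, (l.foldl pvAStep (tc, trv, td)).2.2) = l.foldl pvBStep (tc, td) := by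
  induction l generalizing tc trv td with
  | nil => rfl
  | cons i is ih =>
    simp only [List.foldl]
    by_cases h : tc.contains (pvItemTheme i) = false
    · simp only [pvAStep, pvBStep, h, if_true]
      split <;> apply ih
    · simp only [pvAStep, pvBStep, h]
      split <;> apply ih

-- seeded quote lists are all empty under getD
lemma seed_trv_getD (themes : List (List (String × String))) (trv : PySem.Dict String (List String))
    (h : ∀ k, trv.getD k [] = ([] : List String)) (k : String) :
    (themes.foldl (fun d t => d.insert (pvThemeKey t) []) trv).getD k [] = [] := by
  induction themes generalizing trv with
  | nil => exact h k
  | cons t ts ih =>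
    simp only [List.foldl]
    exact ih _ (fun k' => by rw [PySem.Dict.getD_insert]; split <;> simp [h])

-- the seeded counts and quote dicts have the same keys
lemma seed_contains (themes : List (List (String × String))) (tc : PySem.Dict String Int)
    (trv : PySem.Dict String (List String)) (h : ∀ k, trv.contains k = tc.contains k) (k : String) :
    (themes.foldl (fun d t => d.insert (pvThemeKey t) []) trv).contains k
    = (themes.foldl (fun c t => c.insert (pvThemeKey t) 0) tc).contains k := by
  induction themes generalizing tc trv with
  | nil => exact h k
  | cons t ts ih =>
    simp only [List.foldl]
    exact ih _ _ (fun k' => by simp [PySem.Dict.contains_insert, h])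

-- the heart: A's quote dict, read through getD, is B's comprehension (before the cap at 5)
lemma main_trv (l : List (List (String × String))) (tc : PySem.Dict String Int)
    (trv : PySem.Dict String (List String)) (td : PySem.Dict String String)
    (hc : ∀ k, trv.contains k = tc.contains k) (k : String) :
    (l.foldl pvAStep (tc, trv, td)).2.1.getD k []
    = trv.getD k [] ++ l.filterMap (fun i => if pvItemTheme i == k then (pvD i).get? "text" else none) := by
  induction l generalizing tc trv td with
  | nil => simp
  | cons i is ih =>
    simp only [List.foldl, List.filterMap_cons]
    by_cases hseen : tc.contains (pvItemTheme i) = false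
    · have htrvk : trv.getD (pvItemTheme i) [] = [] := by
        apply PySem.Dict.getD_of_not_contains; rw [hc]; exact hseen
      by_cases ht : (pvD i).contains "text" = true
      · obtain ⟨v, hv⟩ : ∃ v, (pvD i).get? "text" = some v := by
          rw [PySem.Dict.contains_eq_isSome_get?] at ht
          exact Option.isSome_iff_exists.mp ht
        have hvd : (pvD i).getD "text" "" = v := by rw [PySem.Dict.getD_eq_get?_getD, hv]; rfl
        simp only [pvAStep, hseen, if_true, ht, hv, hvd]
        rw [ih _ _ _ (fun k' => by
          simp [PySem.Dict.contains_modify, PySem.Dict.contains_insert, hc])]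
        by_cases hk : k = pvItemTheme i
        · subst hk; simp [htrvk]
        · simp [PySem.Dict.getD_modify, PySem.Dict.getD_insert, hk, Ne.symm hk]
      · have ht' : (pvD i).contains "text" = false := by
          revert ht; cases (pvD i).contains "text" <;> simp
        have hnone : (pvD i).get? "text" = none := by
          rw [PySem.Dict.contains_eq_isSome_get?] at ht
          rcases hx : (pvD i).get? "text" with _ | v
          · rfl
          · rw [hx] at ht; simp at ht
        simp only [pvAStep, hseen, if_true, ht', Bool.false_eq_true, if_false, hnone]
        rw [ih _ _ _ (fun k' => by simp [PySem.Dict.contains_insert, hc])]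
        by_cases hk : k = pvItemTheme i
        · subst hk; simp [htrvk]
        · simp [PySem.Dict.getD_insert, hk, Ne.symm hk]
    · rw [Bool.not_eq_false] at hseen
      by_cases ht : (pvD i).contains "text" = true
      · obtain ⟨v, hv⟩ : ∃ v, (pvD i).get? "text" = some v := by
          rw [PySem.Dict.contains_eq_isSome_get?] at ht
          exact Option.isSome_iff_exists.mp ht
        have hvd : (pvD i).getD "text" "" = v := by rw [PySem.Dict.getD_eq_get?_getD, hv]; rfl
        simp only [pvAStep, hseen, Bool.true_eq_false, if_false, ht, if_pos, hv, hvd]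
        rw [ih _ _ _ (fun k' => by
          simp [PySem.Dict.contains_modify, PySem.Dict.contains_insert, hc])]
        by_cases hk : k = pvItemTheme i
        · subst hk; simp
        · simp [PySem.Dict.getD_modify, hk, Ne.symm hk]
      · have ht' : (pvD i).contains "text" = false := by
          revert ht; cases (pvD i).contains "text" <;> simp
        have hnone : (pvD i).get? "text" = none := by
          rw [PySem.Dict.contains_eq_isSome_get?] at ht
          rcases hx : (pvD i).get? "text" with _ | v
          · rfl
          · rw [hx] at ht; simp at ht
        simp only [pvAStep, hseen, Bool.true_eq_false, if_false, ht', Bool.false_eq_true, hnone]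
        rw [ih _ _ _ (fun k' => by
          simp [PySem.Dict.contains_insert, hc]
          intro h
          rw [h]
          exact hseen)]
        by_cases hk : k = pvItemTheme i
        · subst hk; simp
        · simp [Ne.symm hk]

-- ===== VERDICT (by name: the statement is the Claim_ definition above) =====
theorem summarize_reviews_spec : Claim_equal_summarize_reviews := by
  intro tr ths _ _
  unfold Spec_summarize_reviews summarize_reviews summarize_reviews_alt
  simp only []
  rw [seed_pair]
  have hc0 : ∀ k, (ths.foldl (fun d t => d.insert (pvThemeKey t) ([] : List String)) PySem.Dict.empty).contains k
      = (ths.foldl (fun c t => c.insert (pvThemeKey t) (0 : Int)) PySem.Dict.empty).contains k :=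
    fun k => seed_contains ths _ _ (fun k' => by simp) k
  have hmp := main_proj tr
      (ths.foldl (fun c t => c.insert (pvThemeKey t) (0 : Int)) PySem.Dict.empty)
      (ths.foldl (fun d t => d.insert (pvThemeKey t) ([] : List String)) PySem.Dict.empty)
      (ths.foldl (fun d t => d.insert (pvThemeKey t) ((pvD t).getD "description" "")) PySem.Dict.empty)
  have h1 := congrArg Prod.fst hmp
  have h2 := congrArg Prod.snd hmp
  simp only [] at h1 h2
  rw [← h1, ← h2]
  have hq : ∀ k, PySem.List.slice
      ((tr.foldl pvAStep
        (ths.foldl (fun c t => c.insert (pvThemeKey t) (0 : Int)) PySem.Dict.empty,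
         ths.foldl (fun d t => d.insert (pvThemeKey t) ([] : List String)) PySem.Dict.empty,
         ths.foldl (fun d t => d.insert (pvThemeKey t) ((pvD t).getD "description" "")) PySem.Dict.empty)).2.1.getD k [])
      none (some 5) = pvQuotes tr k := by
    intro k
    rw [PySem.List.slice_to _ (by norm_num)]
    rw [main_trv tr _ _ _ hc0 k]
    rw [seed_trv_getD ths _ (fun k' => by simp) k]
    simp [pvQuotes]
  rw [PySem.List.slice_to _ (by norm_num), show ((3:Int).toNat) = 3 from rfl]
  congr 1
  congr 1
  funext acc p
  rw [hq]
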